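-- pv_equiv track=rewrite | github.com/wanzhouyi/leetcode | 1.数组和字符串/字符串/t9输入/面试题 16.20. T9键盘.py | getValidT9Words
-- ===== SOURCE A (Python) =====
-- from typing import List
--
-- def getValidT9Words(num: str, words: List[str]) -> List[str]:
--     dic = {
--         '1': '!@#',
--         '2': 'abc',
--         '3': 'def',
--         '4': 'ghi',
--         '5': 'jkl',
--         '6': 'mno',
--         '7': 'pqrs',
--         '8': 'tuv',
--         '9': 'wxyz',
--         '0': ' '
--     }
--     candidate = words
--     numList = list(num)
--     for i, n in enumerate(numList):
--         candidate = [w for w in candidate if w[i] in dic[n]]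
--     return candidate
-- ===== SOURCE B (Python) =====
-- from typing import List
--
-- def getValidT9Words(num: str, words: List[str]) -> List[str]:
--     dic = {
--         '1': '!@#',
--         '2': 'abc',
--         '3': 'def',
--         '4': 'ghi',
--         '5': 'jkl',
--         '6': 'mno',
--         '7': 'pqrs',
--         '8': 'tuv',
--         '9': 'wxyz',
--         '0': ' '
--     }
--     allowed = [dic.get(d, '') for d in num]
--     res = []
--     for w in words:
--         ok = True
--         for i, s in enumerate(allowed):
--             if w[i] not in s:
--                 ok = False
--                 break
--         if ok:
--             res.append(w)
--     return res
-- ===== Notes on version B (the rewrite author's own statement) =====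
-- stated objective: alternative
-- what changed: A filters the whole candidate list once per digit (column-major, building len(num) intermediate lists); B precomputes the per-digit allowed-character strings once and makes a single word-major pass, checking each word character by character with early exit.
-- outside the precondition, e.g. on getValidT9Words('2x', ['ab']): A raises KeyError, B returns []; on getValidT9Words('22', ['a']): A raises IndexError, B raises IndexError
import Mathlib
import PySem

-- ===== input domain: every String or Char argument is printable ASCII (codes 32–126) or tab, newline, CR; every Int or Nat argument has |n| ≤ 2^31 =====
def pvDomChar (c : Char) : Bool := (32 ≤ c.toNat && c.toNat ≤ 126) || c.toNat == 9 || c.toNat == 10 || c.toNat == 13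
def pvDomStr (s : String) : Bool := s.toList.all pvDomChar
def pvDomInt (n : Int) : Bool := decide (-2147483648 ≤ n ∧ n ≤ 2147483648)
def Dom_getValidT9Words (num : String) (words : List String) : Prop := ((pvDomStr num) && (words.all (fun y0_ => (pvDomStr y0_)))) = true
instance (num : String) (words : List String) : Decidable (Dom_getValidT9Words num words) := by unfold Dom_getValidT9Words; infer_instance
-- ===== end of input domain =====

-- B replaces A's per-digit filtering of a shrinking list by one word-major pass over a
-- precomputed list of allowed-character strings (same cost; alternative decomposition).

-- ===== PORT A =====
-- the literal T9 dict of A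
def pvDicA : PySem.Dict String String :=
  PySem.Dict.ofList [("1", "!@#"), ("2", "abc"), ("3", "def"), ("4", "ghi"), ("5", "jkl"),
    ("6", "mno"), ("7", "pqrs"), ("8", "tuv"), ("9", "wxyz"), ("0", " ")]

-- on inputs where Python A raises (IndexError / KeyError, excluded by Pre_) the match falls
-- through to `false`; elsewhere it is exact
def getValidT9Words (num : String) (words : List String) : List String :=
  let dic := pvDicA
  let numList := num.toList
  (PySem.List.enumerate numList).foldl
    (fun candidate p =>
      candidate.filter (fun w =>
        match PySem.List.pyGet? w.toList p.1, PySem.Dict.get? dic (String.singleton p.2) with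
        | some c, some s => s.toList.contains c
        | _, _ => false))
    words

-- ===== PORT B =====
def pvDicB : PySem.Dict String String :=
  PySem.Dict.ofList [("1", "!@#"), ("2", "abc"), ("3", "def"), ("4", "ghi"), ("5", "jkl"),
    ("6", "mno"), ("7", "pqrs"), ("8", "tuv"), ("9", "wxyz"), ("0", " ")]

-- the inner `for i, s in enumerate(allowed)` loop with early exit; `none` is Python's
-- IndexError (excluded by Pre_)
def pvMatchB (w : List Char) : List (Int × String) → Bool
  | [] => true
  | (i, s) :: rest =>
    match PySem.List.pyGet? w i with
    | some c => if s.toList.contains c then pvMatchB w rest else false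
    | none => false

def getValidT9Words_alt (num : String) (words : List String) : List String :=
  let dic := pvDicB
  let allowed := num.toList.map (fun d => PySem.Dict.getD dic (String.singleton d) "")
  words.foldl (fun res w => if pvMatchB w.toList (PySem.List.enumerate allowed) then res ++ [w] else res) []

-- ===== PRECONDITION & SPEC =====
-- helper table for Pre_ only: the characters of A's dict entry for d ([] for a non-key)
def pvT9Chars (d : Char) : List Char :=
  if d = '1' then ['!', '@', '#'] else if d = '2' then ['a', 'b', 'c']
  else if d = '3' then ['d', 'e', 'f'] else if d = '4' then ['g', 'h', 'i']
  else if d = '5' then ['j', 'k', 'l'] else if d = '6' then ['m', 'n', 'o']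
  else if d = '7' then ['p', 'q', 'r', 's'] else if d = '8' then ['t', 'u', 'v']
  else if d = '9' then ['w', 'x', 'y', 'z'] else if d = '0' then [' '] else []

-- "w survives A's filters for digits 0..i-1"
def pvPrefixOK (nl w : List Char) (i : Nat) : Bool :=
  (List.range i).all (fun j =>
    match w[j]? with
    | some c => (pvT9Chars (nl[j]!)).contains c
    | none => false)

-- Pre_ excludes exactly the inputs where Python A raises: a word that fully matches a proper
-- prefix of num but is shorter than num (IndexError on w[i]), and a non-keypad character of
-- num reached while some word still survives (KeyError on dic[n]).
def Pre_getValidT9Words (num : String) (words : List String) : Prop :=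
  ∀ i, i < num.toList.length → ∀ w ∈ words,
    pvPrefixOK num.toList w.toList i = true →
    (i < w.toList.length ∧ pvT9Chars (num.toList[i]!) ≠ [])

instance (num : String) (words : List String) : Decidable (Pre_getValidT9Words num words) := by
  unfold Pre_getValidT9Words; infer_instance

def pvWitness_getValidT9Words : String × List String := ("2", ["apple", "cow", "xyz"])

def Spec_getValidT9Words (num : String) (words : List String) (out : List String) : Prop := out = getValidT9Words_alt num words
instance (num : String) (words : List String) (out : List String) : Decidable (Spec_getValidT9Words num words out) := by unfold Spec_getValidT9Words; infer_instance

-- ===== CLAIM (what is proved, stated in full; the proofs are below) =====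
def Claim_equal_getValidT9Words : Prop := ∀ (num : String) (words : List String), Dom_getValidT9Words num words → Pre_getValidT9Words num words → Spec_getValidT9Words num words (getValidT9Words num words)

-- ===== LEMMAS AND PROOFS =====

-- A's repeated filtering is one filter by the conjunction of all per-digit tests
theorem pv_foldl_filter {α β : Type} (l : List β) (p : β → α → Bool) (xs : List α) :
    l.foldl (fun acc b => acc.filter (p b)) xs
      = xs.filter (fun x => l.all (fun b => p b x)) := by
  induction l generalizing xs with
  | nil => simp
  | cons b l ih =>
    rw [List.foldl_cons, ih, List.filter_filter]
    exact List.filter_congr (fun x _ => by rw [List.all_cons]; exact Bool.and_comm _ _)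

-- B's early-exit loop is the conjunction of the same tests
theorem pv_matchB_eq_all (w : List Char) (ps : List (Int × String)) :
    pvMatchB w ps = ps.all (fun p =>
      match PySem.List.pyGet? w p.1 with
      | some c => p.2.toList.contains c
      | none => false) := by
  induction ps with
  | nil => rfl
  | cons p ps ih =>
    obtain ⟨i, s⟩ := p
    rw [List.all_cons]
    cases hg : PySem.List.pyGet? w i with
    | none => simp [pvMatchB, hg]
    | some c => simp [pvMatchB, hg, ih]

theorem pv_enumerate_map {α β : Type} (f : α → β) (l : List α) (s : Int) :
    PySem.List.enumerate (l.map f) s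
      = (PySem.List.enumerate l s).map (fun p => (p.1, f p.2)) := by
  induction l generalizing s with
  | nil => simp [PySem.List.enumerate_nil]
  | cons a l ih => simp [PySem.List.enumerate_cons, ih]

-- the per-position tests of the two ports coincide
theorem pv_pred_eq (dic : PySem.Dict String String) (i : Int) (d : Char) (w : List Char) :
    (match PySem.List.pyGet? w i, PySem.Dict.get? dic (String.singleton d) with
     | some c, some s => s.toList.contains c
     | _, _ => false)
      = (match PySem.List.pyGet? w i with
         | some c => (PySem.Dict.getD dic (String.singleton d) "").toList.contains c
         | none => false) := by
  cases PySem.List.pyGet? w i with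
  | none => cases PySem.Dict.get? dic (String.singleton d) <;> rfl
  | some c =>
    rw [PySem.Dict.getD_eq_get?_getD]
    cases PySem.Dict.get? dic (String.singleton d) <;> simp

theorem pv_all_congr {α : Type} (l : List α) (f g : α → Bool)
    (h : ∀ a ∈ l, f a = g a) : l.all f = l.all g := by
  induction l with
  | nil => rfl
  | cons a l ih =>
    simp only [List.all_cons, h a (List.mem_cons_self), ih (fun a ha => h a (List.mem_cons_of_mem _ ha))]

theorem pvDic_eq : pvDicB = pvDicA := rfl

theorem getValidT9Words_eq (num : String) (words : List String) :
    getValidT9Words num words = getValidT9Words_alt num words := by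
  simp only [getValidT9Words, getValidT9Words_alt]
  rw [pv_foldl_filter, PySem.List.foldl_append_if, pv_enumerate_map]
  simp only [List.nil_append, List.map_id']
  refine (List.filter_congr (fun w _ => ?_)).symm
  rw [pv_matchB_eq_all, List.all_map]
  refine pv_all_congr _ _ _ (fun p _ => ?_)
  obtain ⟨i, d⟩ := p
  rw [pvDic_eq]
  exact (pv_pred_eq pvDicA i d w.toList).symm

-- ===== VERDICT (by name: the statement is the Claim_ definition above) =====
theorem getValidT9Words_spec : Claim_equal_getValidT9Words := by
  intro num words _ _
  unfold Spec_getValidT9Words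
  exact getValidT9Words_eq num words
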